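-- pv_equiv track=rewrite | github.com/dacasals/learnedcardinalities | mscn/util.py | get_all_column_op_uris_names
-- ===== SOURCE A (Python) =====
-- def get_all_column_op_uris_names(predicates):
--     column_names = set()
--     op_names = set()
--     uri_names = set()
--     for query in predicates:
--         for predicate in query:
--             if len(predicate) == 4:
--
--                 column_name = predicate[0]
--                 column_names.add(column_name)
--
--                 op_name = predicate[1]
--                 op_names.add(op_name)
--
--                 uri_name = predicate[2]
--                 if int(predicate[3]) > 3:
--                     uri_names.add(uri_name)
--
--     return column_names, op_names, uri_names
-- ===== SOURCE B (Python) =====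
-- def _contrib(p):
--     # per-predicate contribution: singleton (or empty) sets
--     if len(p) != 4:
--         return set(), set(), set()
--     return {p[0]}, {p[1]}, {p[2]} if int(p[3]) > 3 else set()
--
--
-- def _union3(t1, t2):
--     return t1[0] | t2[0], t1[1] | t2[1], t1[2] | t2[2]
--
--
-- def _reduce_preds(q):
--     if not q:
--         return set(), set(), set()
--     return _union3(_contrib(q[0]), _reduce_preds(q[1:]))
--
--
-- def get_all_column_op_uris_names(predicates):
--     if not predicates:
--         return set(), set(), set()
--     return _union3(_reduce_preds(predicates[0]),
--                    get_all_column_op_uris_names(predicates[1:]))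
-- ===== Notes on version B (the rewrite author's own statement) =====
-- stated objective: alternative
-- what changed: A's imperative nested loop mutating three shared sets is replaced by a recursive map-reduce: each predicate is mapped to a triple of singleton/empty sets and the triples are combined with a set-union monoid over the recursive structure.
import Mathlib
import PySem

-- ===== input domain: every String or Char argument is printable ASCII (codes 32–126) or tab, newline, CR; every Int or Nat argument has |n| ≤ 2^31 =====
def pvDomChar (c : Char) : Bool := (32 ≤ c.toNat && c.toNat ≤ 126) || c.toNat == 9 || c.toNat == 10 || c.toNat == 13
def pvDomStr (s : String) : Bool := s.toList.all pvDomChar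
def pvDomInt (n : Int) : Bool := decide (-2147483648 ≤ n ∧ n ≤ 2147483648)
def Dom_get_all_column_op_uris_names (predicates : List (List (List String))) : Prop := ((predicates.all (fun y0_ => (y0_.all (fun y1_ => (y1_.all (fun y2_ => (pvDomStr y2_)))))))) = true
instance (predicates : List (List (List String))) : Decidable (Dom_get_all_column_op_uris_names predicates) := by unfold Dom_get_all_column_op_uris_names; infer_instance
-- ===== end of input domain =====

-- B replaces A's imperative nested loop mutating three shared sets by a recursive map-reduce:
-- each predicate is mapped to a triple of singleton/empty sets, combined with a set-union monoid.


-- ===== PORT A =====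
-- int(predicate[3]) is total here via getD 0; Pre_ excludes the inputs where Python raises ValueError.
def get_all_column_op_uris_names (predicates : List (List (List String))) : List String × List String × List String :=
  predicates.foldl (fun st query =>
    query.foldl (fun (st : List String × List String × List String) predicate =>
      if predicate.length == 4 then
        let column_names := PySem.Set.add st.1 (PySem.List.pyGetD predicate 0 "")
        let op_names := PySem.Set.add st.2.1 (PySem.List.pyGetD predicate 1 "")
        let uri_names :=
          if ((PySem.Int.ofStr? (PySem.List.pyGetD predicate 3 "")).getD 0) > 3 then
            PySem.Set.add st.2.2 (PySem.List.pyGetD predicate 2 "")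
          else st.2.2
        (column_names, op_names, uri_names)
      else st) st) ([], [], [])

-- ===== PORT B =====
def pvContrib (p : List String) : List String × List String × List String :=
  if p.length != 4 then ([], [], [])
  else ([PySem.List.pyGetD p 0 ""], [PySem.List.pyGetD p 1 ""],
        if ((PySem.Int.ofStr? (PySem.List.pyGetD p 3 "")).getD 0) > 3 then
          [PySem.List.pyGetD p 2 ""] else [])

def pvUnion3 (t1 t2 : List String × List String × List String) :
    List String × List String × List String :=
  (PySem.Set.union t1.1 t2.1, PySem.Set.union t1.2.1 t2.2.1, PySem.Set.union t1.2.2 t2.2.2)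

def pvReducePreds (q : List (List String)) : List String × List String × List String :=
  match q with
  | [] => ([], [], [])
  | p :: ps => pvUnion3 (pvContrib p) (pvReducePreds ps)

def get_all_column_op_uris_names_alt (predicates : List (List (List String))) : List String × List String × List String :=
  match predicates with
  | [] => ([], [], [])
  | q :: qs => pvUnion3 (pvReducePreds q) (get_all_column_op_uris_names_alt qs)

-- ===== PRECONDITION & SPEC =====
-- Pre_ excludes inputs where some length-4 predicate has a non-int fourth field, on which Python A raises ValueError.
def Pre_get_all_column_op_uris_names (predicates : List (List (List String))) : Prop :=
  (predicates.all (fun query => query.all (fun p =>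
    p.length != 4 || (PySem.Int.ofStr? (PySem.List.pyGetD p 3 "")).isSome))) = true
instance (predicates : List (List (List String))) : Decidable (Pre_get_all_column_op_uris_names predicates) := by unfold Pre_get_all_column_op_uris_names; infer_instance
def pvWitness_get_all_column_op_uris_names : List (List (List String)) :=
  [[["c1", "=", "u1", "5"], ["c2", "<", "u2", "2"], ["x", "y"]], []]

def Spec_get_all_column_op_uris_names (predicates : List (List (List String))) (out : List String × List String × List String) : Prop := out = get_all_column_op_uris_names_alt predicates
instance (predicates : List (List (List String))) (out : List String × List String × List String) : Decidable (Spec_get_all_column_op_uris_names predicates out) := by unfold Spec_get_all_column_op_uris_names; infer_instance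

-- ===== CLAIM =====
def Claim_equal_get_all_column_op_uris_names : Prop := ∀ (predicates : List (List (List String))), Dom_get_all_column_op_uris_names predicates → Pre_get_all_column_op_uris_names predicates → Spec_get_all_column_op_uris_names predicates (get_all_column_op_uris_names predicates)

-- ===== LEMMAS AND PROOFS =====

-- A's body step on one predicate
def pvStep (st : List String × List String × List String) (p : List String) :
    List String × List String × List String :=
  if p.length == 4 then
    (PySem.Set.add st.1 (PySem.List.pyGetD p 0 ""),
     PySem.Set.add st.2.1 (PySem.List.pyGetD p 1 ""),
     if ((PySem.Int.ofStr? (PySem.List.pyGetD p 3 "")).getD 0) > 3 then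
       PySem.Set.add st.2.2 (PySem.List.pyGetD p 2 "")
     else st.2.2)
  else st

theorem pvAdd_eq_update_append {α : Type} [BEq α] [LawfulBEq α] (s t : List α) (x : α) :
    PySem.Set.add (PySem.Set.update s t) x = PySem.Set.update s (PySem.Set.add t x) := by
  by_cases hx : x ∈ t
  · rw [PySem.Set.add_of_mem hx, PySem.Set.add_of_mem]
    exact (PySem.Set.mem_update _ _ _).mpr (Or.inr hx)
  · rw [PySem.Set.add_of_not_mem hx, PySem.Set.update_append, PySem.Set.update_cons,
        PySem.Set.update_nil]

theorem pvUpdate_update {α : Type} [BEq α] [LawfulBEq α] (s t u : List α) :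
    PySem.Set.update (PySem.Set.update s t) u = PySem.Set.update s (PySem.Set.update t u) := by
  induction u generalizing t with
  | nil => rfl
  | cons x u' ih =>
    rw [PySem.Set.update_cons, PySem.Set.update_cons, pvAdd_eq_update_append, ih]

theorem pvUnion3_assoc (s t u : List String × List String × List String) :
    pvUnion3 (pvUnion3 s t) u = pvUnion3 s (pvUnion3 t u) := by
  simp [pvUnion3, PySem.Set.union, pvUpdate_update]

theorem pvUnion3_empty_right (s : List String × List String × List String) :
    pvUnion3 s ([], [], []) = s := by
  simp [pvUnion3, PySem.Set.union, PySem.Set.update_nil]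

theorem pvStep_eq_union3 (st : List String × List String × List String) (p : List String) :
    pvStep st p = pvUnion3 st (pvContrib p) := by
  by_cases h : p.length = 4
  · by_cases hc : ((PySem.Int.ofStr? (PySem.List.pyGetD p 3 "")).getD 0) > 3 <;>
      simp [pvStep, pvContrib, pvUnion3, h, hc, PySem.Set.union, PySem.Set.update_cons,
        PySem.Set.update_nil]
  · simp [pvStep, pvContrib, h, pvUnion3_empty_right]

theorem pvFoldl_preds (q : List (List String)) (st : List String × List String × List String) :
    q.foldl pvStep st = pvUnion3 st (pvReducePreds q) := by
  induction q generalizing st with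
  | nil => simp [pvReducePreds, pvUnion3_empty_right]
  | cons p ps ih =>
    rw [List.foldl_cons, ih, pvStep_eq_union3, pvUnion3_assoc]
    rfl

theorem pvFoldl_queries (qs : List (List (List String)))
    (st : List String × List String × List String) :
    qs.foldl (fun st q => q.foldl pvStep st) st = pvUnion3 st (get_all_column_op_uris_names_alt qs) := by
  induction qs generalizing st with
  | nil => simp [get_all_column_op_uris_names_alt, pvUnion3_empty_right]
  | cons q qs' ih =>
    rw [List.foldl_cons, pvFoldl_preds, ih, pvUnion3_assoc]
    rfl

theorem pvA_eq_foldl_step (predicates : List (List (List String))) :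
    get_all_column_op_uris_names predicates =
      predicates.foldl (fun st q => q.foldl pvStep st) ([], [], []) := rfl

theorem pvUnion3_empty_left (t : List String × List String × List String)
    (h1 : t.1.Nodup) (h2 : t.2.1.Nodup) (h3 : t.2.2.Nodup) :
    pvUnion3 ([], [], []) t = t := by
  obtain ⟨a, b, c⟩ := t
  simp only [pvUnion3, PySem.Set.union, PySem.Set.update_nil_left]
  simp_all [PySem.Set.ofList_eq_self_of_nodup]

theorem pvReduce_nodup (qs : List (List (List String))) :
    (get_all_column_op_uris_names_alt qs).1.Nodup ∧
    (get_all_column_op_uris_names_alt qs).2.1.Nodup ∧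
    (get_all_column_op_uris_names_alt qs).2.2.Nodup := by
  induction qs with
  | nil => simp [get_all_column_op_uris_names_alt]
  | cons q qs' ih =>
    have hq : (pvReducePreds q).1.Nodup ∧ (pvReducePreds q).2.1.Nodup ∧
        (pvReducePreds q).2.2.Nodup := by
      induction q with
      | nil => simp [pvReducePreds]
      | cons p ps ihp =>
        have hc : (pvContrib p).1.Nodup ∧ (pvContrib p).2.1.Nodup ∧
            (pvContrib p).2.2.Nodup := by
          by_cases h : p.length = 4
          · by_cases hcnd : ((PySem.Int.ofStr? (PySem.List.pyGetD p 3 "")).getD 0) > 3 <;>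
              simp [pvContrib, h, hcnd]
          · simp [pvContrib, h]
        simp only [pvReducePreds, pvUnion3, PySem.Set.union]
        exact ⟨PySem.Set.nodup_update _ _ hc.1, PySem.Set.nodup_update _ _ hc.2.1,
          PySem.Set.nodup_update _ _ hc.2.2⟩
    simp only [get_all_column_op_uris_names_alt, pvUnion3, PySem.Set.union]
    exact ⟨PySem.Set.nodup_update _ _ hq.1, PySem.Set.nodup_update _ _ hq.2.1,
      PySem.Set.nodup_update _ _ hq.2.2⟩

-- ===== VERDICT =====
theorem get_all_column_op_uris_names_spec : Claim_equal_get_all_column_op_uris_names := by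
  intro predicates _ _
  unfold Spec_get_all_column_op_uris_names
  rw [pvA_eq_foldl_step, pvFoldl_queries]
  exact pvUnion3_empty_left _ (pvReduce_nodup predicates).1 (pvReduce_nodup predicates).2.1
    (pvReduce_nodup predicates).2.2
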